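-- pv_equiv track=rewrite | github.com/PKUYeYuan/ACL2018_CFDP | Code/Fine/best-glove-pos-position-mem/Get_Vector.py | get_action_vector_list
-- ===== SOURCE A (Python) =====
-- def get_action_vector_list(actionStack, handle_len):
--     action_length = len(actionStack)
--     action_vector = []
--     if action_length < handle_len:
--         padding_length = handle_len - action_length
--         for i in range(padding_length):
--             action_vector.append(4)
--         for i in range(action_length):
--             action_vector.append(actionStack[i])
--     else:
--         for i in range(handle_len):
--             action_vector.append(actionStack[action_length - handle_len + i])
--     return action_vector
-- ===== SOURCE B (Python) =====
-- def get_action_vector_list(actionStack, handle_len):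
--     # Build the vector back-to-front: consume the stack from its right end,
--     # padding with 4 once it is exhausted, then reverse.
--     out = []
--     stack = list(actionStack)
--     for _ in range(handle_len):
--         out.append(stack.pop() if stack else 4)
--     out.reverse()
--     return out
-- ===== Notes on version B (the rewrite author's own statement) =====
-- stated objective: alternative
-- what changed: Replaces A's if/else with three index loops by a single back-to-front construction: one loop pops elements off the right end of a working copy of the stack (emitting the pad value 4 once it is empty) and the accumulated list is reversed at the end, so padding and truncation fall out of the same pop loop with no branch on the lengths.
import Mathlib
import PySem

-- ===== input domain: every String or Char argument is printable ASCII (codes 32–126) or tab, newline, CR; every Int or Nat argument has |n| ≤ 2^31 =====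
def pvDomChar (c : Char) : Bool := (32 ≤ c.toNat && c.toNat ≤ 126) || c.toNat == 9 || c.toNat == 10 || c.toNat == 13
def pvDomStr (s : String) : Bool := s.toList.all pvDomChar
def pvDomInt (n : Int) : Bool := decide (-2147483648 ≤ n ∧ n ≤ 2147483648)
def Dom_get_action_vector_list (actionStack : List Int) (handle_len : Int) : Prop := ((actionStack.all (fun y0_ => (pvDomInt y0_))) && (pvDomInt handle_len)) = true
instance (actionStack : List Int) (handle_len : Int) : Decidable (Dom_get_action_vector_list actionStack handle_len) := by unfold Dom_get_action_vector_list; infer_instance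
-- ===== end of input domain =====

-- B builds the vector back-to-front with a single pop-from-the-right loop (padding with 4
-- once the stack is exhausted) followed by a reverse, instead of A's branch with three
-- index loops (objective: alternative decomposition, same cost).

-- ===== PORT A =====
def get_action_vector_list (actionStack : List Int) (handle_len : Int) : List Int :=
  let action_length : Int := PySem.List.len actionStack
  if action_length < handle_len then
    let padding_length := handle_len - action_length
    let v1 := (PySem.List.pyRange 0 padding_length 1).foldl
      (fun acc _ => acc ++ [(4 : Int)]) []
    (PySem.List.pyRange 0 action_length 1).foldl
      (fun acc i => acc ++ [PySem.List.pyGetD actionStack i 0]) v1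
  else
    (PySem.List.pyRange 0 handle_len 1).foldl
      (fun acc i => acc ++ [PySem.List.pyGetD actionStack (action_length - handle_len + i) 0]) []

-- ===== PORT B =====
def get_action_vector_list_alt (actionStack : List Int) (handle_len : Int) : List Int :=
  let r := (PySem.List.pyRange 0 handle_len 1).foldl
    (fun s _ =>
      match PySem.List.pop? s.2 (-1) with   -- 'stack.pop() if stack else 4'
      | some (v, rest) => (s.1 ++ [v], rest)
      | none => (s.1 ++ [(4 : Int)], s.2))
    ([], actionStack)
  r.1.reverse

-- ===== PRECONDITION & SPEC =====
def Spec_get_action_vector_list (actionStack : List Int) (handle_len : Int) (out : List Int) : Prop := out = get_action_vector_list_alt actionStack handle_len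
instance (actionStack : List Int) (handle_len : Int) (out : List Int) : Decidable (Spec_get_action_vector_list actionStack handle_len out) := by unfold Spec_get_action_vector_list; infer_instance

-- ===== CLAIM =====
def Claim_equal_get_action_vector_list : Prop := ∀ (actionStack : List Int) (handle_len : Int), Dom_get_action_vector_list actionStack handle_len → Spec_get_action_vector_list actionStack handle_len (get_action_vector_list actionStack handle_len)

-- ===== LEMMAS AND PROOFS =====

-- B's loop step (proof-side abbreviation of the lambda in the port).
def bstep (s : List Int × List Int) : List Int × List Int :=
  match PySem.List.pop? s.2 (-1) with
  | some (v, rest) => (s.1 ++ [v], rest)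
  | none => (s.1 ++ [(4 : Int)], s.2)

theorem pop_neg_one_concat (xs : List Int) (x : Int) :
    PySem.List.pop? (xs ++ [x]) (-1) = some (x, xs) := by
  simp [PySem.List.pop?, PySem.List.pyIdx?, List.eraseIdx_append_of_length_le]

-- a foldl whose step ignores the element is an iterate
theorem foldl_ignore {α : Type} (g : α → α) (l : List Int) (init : α) :
    l.foldl (fun s _ => g s) init = g^[l.length] init := by
  induction l generalizing init with
  | nil => rfl
  | cons x t ih => simp [List.foldl_cons, ih, Function.iterate_succ_apply]

-- invariant of B's loop: after k pops, out holds the last min(k,|st|) elements of st in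
-- reverse order followed by (k - |st|) pad 4s
theorem iter_bstep (k : Nat) : ∀ (out st : List Int),
    (bstep^[k] (out, st)).1
      = out ++ (st.drop (st.length - k)).reverse ++ List.replicate (k - st.length) 4 := by
  induction k with
  | zero => intro out st; simp
  | succ k ih =>
    intro out st
    rcases st.eq_nil_or_concat with rfl | ⟨st', v, rfl⟩
    · rw [Function.iterate_succ_apply]
      have hstep : bstep (out, ([] : List Int)) = (out ++ [(4 : Int)], []) := by
        simp [bstep, PySem.List.pop?]
      rw [hstep, ih]
      simp [List.replicate_succ]
    · simp only [List.concat_eq_append]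
      rw [Function.iterate_succ_apply]
      have hstep : bstep (out, st' ++ [v]) = (out ++ [v], st') := by
        simp [bstep, pop_neg_one_concat]
      rw [hstep, ih]
      have h1 : (st' ++ [v]).length - (k + 1) = st'.length - k := by
        simp only [List.length_append, List.length_cons, List.length_nil]; omega
      have h2 : (k + 1) - (st' ++ [v]).length = k - st'.length := by
        simp only [List.length_append, List.length_cons, List.length_nil]; omega
      rw [h1, h2, List.drop_append_of_le_length (by omega)]
      simp

-- closed form of B
theorem alt_closed (xs : List Int) (h : Int) :
    get_action_vector_list_alt xs h
      = List.replicate (h.toNat - xs.length) 4 ++ xs.drop (xs.length - h.toNat) := by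
  unfold get_action_vector_list_alt
  rw [show (fun (s : List Int × List Int) (_ : Int) =>
        match PySem.List.pop? s.2 (-1) with
        | some (v, rest) => (s.1 ++ [v], rest)
        | none => (s.1 ++ [(4 : Int)], s.2)) = (fun s _ => bstep s) from rfl,
      foldl_ignore, PySem.List.length_pyRange_one]
  rw [show ((h : Int) - 0).toNat = h.toNat by omega]
  show (bstep^[h.toNat] ([], xs)).1.reverse = _
  rw [iter_bstep]
  simp

-- A's append-loops as maps over their ranges
theorem loopA_eq_map (f : Int → Int) (a b : Int) (init : List Int) :
    (PySem.List.pyRange a b 1).foldl (fun acc i => acc ++ [f i]) init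
      = init ++ (PySem.List.pyRange a b 1).map f :=
  PySem.List.foldl_append_singleton_eq_map _ _ _

-- closed form of A
theorem a_closed (xs : List Int) (h : Int) :
    get_action_vector_list xs h
      = List.replicate (h.toNat - xs.length) 4 ++ xs.drop (xs.length - h.toNat) := by
  unfold get_action_vector_list
  simp only [PySem.List.len_eq]
  by_cases hc : (xs.length : Int) < h
  · -- padding branch
    rw [if_pos hc, loopA_eq_map (fun _ => (4 : Int)), loopA_eq_map (fun i => PySem.List.pyGetD xs i 0)]
    have hmap4 : (PySem.List.pyRange 0 (h - (xs.length : Int)) 1).map (fun _ => (4 : Int))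
        = List.replicate (h.toNat - xs.length) 4 := by
      rw [List.eq_replicate_iff]
      constructor
      · rw [List.length_map, PySem.List.length_pyRange_one]; omega
      · intro b hb; rcases List.mem_map.mp hb with ⟨a, -, rfl⟩; rfl
    have hmapxs : (PySem.List.pyRange 0 (PySem.List.len xs) 1).map (fun i => PySem.List.pyGetD xs i 0) = xs :=
      PySem.List.map_pyGetD_pyRange_zero xs 0
    simp only [PySem.List.len_eq] at hmapxs
    rw [hmap4, hmapxs, show xs.length - h.toNat = 0 by omega]
    simp
  · -- truncation branch
    rw [if_neg hc, loopA_eq_map (fun i => PySem.List.pyGetD xs ((xs.length : Int) - h + i) 0)]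
    rw [show h.toNat - xs.length = 0 by omega]
    by_cases hpos : 0 < h
    · have hshift : (PySem.List.pyRange 0 h 1).map (fun i => PySem.List.pyGetD xs ((xs.length : Int) - h + i) 0)
          = (PySem.List.pyRange ((xs.length : Int) - h) (PySem.List.len xs) 1).map
              (fun j => PySem.List.pyGetD xs j 0) := by
        rw [PySem.List.pyRange_one 0 h, PySem.List.pyRange_one ((xs.length : Int) - h)]
        simp only [PySem.List.len_eq, List.map_map]
        rw [show (xs.length : Int) - ((xs.length : Int) - h) = h by omega]
        simp only [sub_zero]
        apply List.map_congr_left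
        intro k _
        simp [Function.comp]
      rw [hshift, PySem.List.map_pyGetD_pyRange xs 0 (a := (xs.length : Int) - h) (by omega)]
      rw [show ((xs.length : Int) - h).toNat = xs.length - h.toNat by omega]
      simp
    · rw [PySem.List.pyRange_one_eq_nil (by omega)]
      rw [show xs.length - h.toNat = xs.length by omega]
      simp

-- ===== VERDICT =====
theorem get_action_vector_list_spec : Claim_equal_get_action_vector_list := by
  intro xs h _
  unfold Spec_get_action_vector_list
  rw [a_closed, alt_closed]
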